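-- pv_equiv track=rewrite | github.com/bsuman/jobrelatred | DSAlgoFCC/Graph/CheckPathExistsUndirectedGraph.py | createundirectedgraph
-- ===== SOURCE A (Python) =====
-- def createundirectedgraph(edges: list[list]):
--     graph = {}
--     for ilist in edges:
--         node1 = ilist[0]
--         node2 = ilist[1]
--         if node1 in graph:
--             graph[node1] = graph[node1] + [node2]
--         else:
--             graph[node1] = [node2]
--         if node2 in graph:
--             graph[node2] = graph[node2] + [node1]
--         else:
--             graph[node2] = [node1]
--
--     return graph
-- ===== SOURCE B (Python) =====
-- def createundirectedgraph(edges: list[list]):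
--     # pass 1: ordered list of distinct nodes (first appearance)
--     nodes = []
--     for edge in edges:
--         if edge[0] not in nodes:
--             nodes.append(edge[0])
--         if edge[1] not in nodes:
--             nodes.append(edge[1])
--     # pass 2: per node, rescan all edges to collect neighbours
--     graph = {}
--     for node in nodes:
--         nbrs = []
--         for edge in edges:
--             if edge[0] == node:
--                 nbrs.append(edge[1])
--             if edge[1] == node:
--                 nbrs.append(edge[0])
--         graph[node] = nbrs
--     return graph
-- ===== Notes on version B (the rewrite author's own statement) =====
-- stated objective: alternative
-- what changed: A builds the adjacency dict in one pass, updating both endpoints' lists per edge; B first collects the ordered list of distinct nodes, then for each node rescans the whole edge list to assemble its neighbour list before inserting it once.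
import Mathlib
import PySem

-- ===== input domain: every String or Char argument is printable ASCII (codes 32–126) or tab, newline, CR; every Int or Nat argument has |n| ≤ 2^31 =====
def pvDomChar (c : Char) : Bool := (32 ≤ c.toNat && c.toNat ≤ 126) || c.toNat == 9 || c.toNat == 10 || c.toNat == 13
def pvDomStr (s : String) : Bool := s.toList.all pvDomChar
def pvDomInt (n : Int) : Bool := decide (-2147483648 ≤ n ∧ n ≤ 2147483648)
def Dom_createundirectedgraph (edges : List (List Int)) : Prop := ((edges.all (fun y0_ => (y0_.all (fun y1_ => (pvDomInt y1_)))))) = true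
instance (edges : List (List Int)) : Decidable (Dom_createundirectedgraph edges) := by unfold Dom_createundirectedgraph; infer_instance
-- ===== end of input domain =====

-- B replaces A's single incremental-dict pass by a distinct-node pass followed by a
-- per-node rescan of the edge list (alternative decomposition, same result).

-- ===== PORT A =====
-- ilist[0] / ilist[1]; Pre_ guarantees length ≥ 2, so the .getD 0 default is never used
def pvE0 (e : List Int) : Int := (PySem.List.pyGet? e 0).getD 0
def pvE1 (e : List Int) : Int := (PySem.List.pyGet? e 1).getD 0

def stepA (g : PySem.Dict Int (List Int)) (e : List Int) : PySem.Dict Int (List Int) :=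
  let node1 := pvE0 e
  let node2 := pvE1 e
  let g1 := if g.contains node1 then g.insert node1 (g.getD node1 [] ++ [node2])
            else g.insert node1 [node2]
  if g1.contains node2 then g1.insert node2 (g1.getD node2 [] ++ [node1])
  else g1.insert node2 [node1]

def createundirectedgraph (edges : List (List Int)) : List (Int × List Int) :=
  (edges.foldl stepA PySem.Dict.empty).items

-- ===== PORT B =====
-- pass 1: ordered list of distinct nodes (first appearance)
def altNodes (edges : List (List Int)) : List Int :=
  edges.foldl (fun ns e =>
    let ns := if pvE0 e ∈ ns then ns else ns ++ [pvE0 e]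
    if pvE1 e ∈ ns then ns else ns ++ [pvE1 e]) []

-- pass 2 inner loop: neighbours of one node, rescanning all edges
def altNbrs (edges : List (List Int)) (node : Int) : List Int :=
  edges.foldl (fun acc e =>
    let acc := if pvE0 e = node then acc ++ [pvE1 e] else acc
    if pvE1 e = node then acc ++ [pvE0 e] else acc) []

def createundirectedgraph_alt (edges : List (List Int)) : List (Int × List Int) :=
  ((altNodes edges).foldl
    (fun g node => g.insert node (altNbrs edges node)) PySem.Dict.empty).items

-- ===== PRECONDITION & SPEC =====
-- Pre_ excludes exactly the inputs on which Python A raises IndexError: an edge with fewer than 2 entries.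
def Pre_createundirectedgraph (edges : List (List Int)) : Prop :=
  ∀ e ∈ edges, 2 ≤ e.length
instance (edges : List (List Int)) : Decidable (Pre_createundirectedgraph edges) := by
  unfold Pre_createundirectedgraph; infer_instance

def pvWitness_createundirectedgraph : List (List Int) := [[1, 2], [2, 3], [1, 1]]

def Spec_createundirectedgraph (edges : List (List Int)) (out : List (Int × List Int)) : Prop := out = createundirectedgraph_alt edges
instance (edges : List (List Int)) (out : List (Int × List Int)) : Decidable (Spec_createundirectedgraph edges out) := by unfold Spec_createundirectedgraph; infer_instance

-- ===== CLAIM (what is proved, stated in full; the proofs are below) =====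
def Claim_equal_createundirectedgraph : Prop := ∀ (edges : List (List Int)), Dom_createundirectedgraph edges → Pre_createundirectedgraph edges → Spec_createundirectedgraph edges (createundirectedgraph edges)

-- ===== LEMMAS AND PROOFS =====

-- appending one node if not yet present (proof-side view of both loops' if-steps)
def addNode (ns : List Int) (x : Int) : List Int := if x ∈ ns then ns else ns ++ [x]

def nodesStep (ns : List Int) (e : List Int) : List Int :=
  addNode (addNode ns (pvE0 e)) (pvE1 e)

-- the per-edge update of the "neighbour lists so far" function
def updG (g : Int → List Int) (e : List Int) : Int → List Int :=
  fun n =>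
    let acc := g n
    let acc := if pvE0 e = n then acc ++ [pvE1 e] else acc
    if pvE1 e = n then acc ++ [pvE0 e] else acc

lemma mem_addNode {ns : List Int} {x n : Int} :
    n ∈ addNode ns x ↔ n ∈ ns ∨ n = x := by
  unfold addNode
  split_ifs with h
  · constructor
    · exact Or.inl
    · rintro (h' | rfl) <;> [exact h'; exact h]
  · simp

lemma addNode_nodup {ns : List Int} (h : ns.Nodup) (x : Int) :
    (addNode ns x).Nodup := by
  unfold addNode
  split_ifs with h1
  · exact h
  · rw [List.nodup_append]
    refine ⟨h, List.nodup_singleton x, ?_⟩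
    intro a ha b hb
    simp only [List.mem_singleton] at hb
    exact fun hab => h1 ((hab.trans hb) ▸ ha)

lemma keys_mapDict (ns : List Int) (g : Int → List Int) :
    (PySem.Dict.mk (ns.map fun n => (n, g n))).keys = ns := by
  simp only [PySem.Dict.keys, List.map_map]
  exact List.map_id ns

lemma contains_mapDict (ns : List Int) (g : Int → List Int) (a : Int) :
    (PySem.Dict.mk (ns.map fun n => (n, g n))).contains a = decide (a ∈ ns) := by
  rw [PySem.Dict.contains_eq_decide_mem_keys, keys_mapDict]

lemma getD_mapDict {ns : List Int} (g : Int → List Int) {a : Int}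
    (hnd : ns.Nodup) (ha : a ∈ ns) :
    (PySem.Dict.mk (ns.map fun n => (n, g n))).getD a [] = g a := by
  apply PySem.Dict.getD_of_mem_items
  · exact List.mem_map.mpr ⟨a, ha, rfl⟩
  · rw [keys_mapDict]; exact hnd

lemma insert_mapDict {ns : List Int} (g : Int → List Int) (a : Int) (v : List Int) :
    (PySem.Dict.mk (ns.map fun n => (n, g n))).insert a v
      = PySem.Dict.mk ((addNode ns a).map (fun n => (n, if n = a then v else g n))) := by
  apply PySem.Dict.ext
  unfold addNode
  by_cases ha : a ∈ ns
  · rw [PySem.Dict.items_insert_of_contains _ _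
      (by rw [contains_mapDict]; simpa using ha), if_pos ha]
    simp only [List.map_map]
    apply List.map_congr_left
    intro n _
    by_cases h : n = a <;> simp [h]
  · rw [PySem.Dict.items_insert_of_not_contains _ _
      (by rw [contains_mapDict]; simpa using ha), if_neg ha]
    simp only [List.map_append]
    congr 1
    · apply List.map_congr_left
      intro n hn
      have : n ≠ a := fun h => ha (h ▸ hn)
      simp [this]
    · simp

-- one 'if node in graph … else …' half of A's loop body, on a dict of that shape
lemma stepHalf_mapDict {ns : List Int} {g : Int → List Int}
    (hnd : ns.Nodup) (x y : Int) (h0x : x ∉ ns → g x = []) :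
    (if (PySem.Dict.mk (ns.map fun n => (n, g n))).contains x then
       (PySem.Dict.mk (ns.map fun n => (n, g n))).insert x
         ((PySem.Dict.mk (ns.map fun n => (n, g n))).getD x [] ++ [y])
     else (PySem.Dict.mk (ns.map fun n => (n, g n))).insert x [y])
    = PySem.Dict.mk ((addNode ns x).map (fun n => (n, if n = x then g x ++ [y] else g n))) := by
  rw [contains_mapDict]
  by_cases hm : x ∈ ns
  · rw [if_pos (by simpa using hm), getD_mapDict g hnd hm,
      insert_mapDict g x (g x ++ [y])]
  · rw [if_neg (by simpa using hm), insert_mapDict g x [y], h0x hm]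
    simp

-- one edge of A's loop, on a dict of that shape
lemma stepA_mapDict {ns : List Int} {g : Int → List Int}
    (hnd : ns.Nodup) (h0 : ∀ n, n ∉ ns → g n = []) (e : List Int) :
    stepA (PySem.Dict.mk (ns.map fun n => (n, g n))) e
      = PySem.Dict.mk ((nodesStep ns e).map fun n => (n, updG g e n)) := by
  rw [show stepA (PySem.Dict.mk (ns.map fun n => (n, g n))) e
      = (let g1 := if (PySem.Dict.mk (ns.map fun n => (n, g n))).contains (pvE0 e) then
            (PySem.Dict.mk (ns.map fun n => (n, g n))).insert (pvE0 e)
              ((PySem.Dict.mk (ns.map fun n => (n, g n))).getD (pvE0 e) [] ++ [pvE1 e])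
          else (PySem.Dict.mk (ns.map fun n => (n, g n))).insert (pvE0 e) [pvE1 e]
        if g1.contains (pvE1 e) then g1.insert (pvE1 e) (g1.getD (pvE1 e) [] ++ [pvE0 e])
        else g1.insert (pvE1 e) [pvE0 e]) from rfl]
  simp only []
  rw [stepHalf_mapDict hnd (pvE0 e) (pvE1 e) (h0 _)]
  rw [stepHalf_mapDict (addNode_nodup hnd (pvE0 e)) (pvE1 e) (pvE0 e)
    (by
      intro hb
      have hbns : pvE1 e ∉ ns := fun h => hb (mem_addNode.mpr (Or.inl h))
      have hba : pvE1 e ≠ pvE0 e := fun h => hb (mem_addNode.mpr (Or.inr h))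
      simp [hba, h0 _ hbns])]
  unfold nodesStep
  congr 1
  apply List.map_congr_left
  intro n _
  unfold updG
  by_cases h1 : n = pvE0 e <;> by_cases h2 : n = pvE1 e <;>
    by_cases h3 : pvE0 e = pvE1 e <;>
    simp [h1, h2, h3, eq_comm, List.append_assoc]

-- main invariant: A's fold over es, from a dict of that shape
lemma foldA_mapDict (es : List (List Int)) :
    ∀ (ns : List Int) (g : Int → List Int), ns.Nodup → (∀ n, n ∉ ns → g n = []) →
    es.foldl stepA (PySem.Dict.mk (ns.map fun n => (n, g n)))
      = PySem.Dict.mk ((es.foldl nodesStep ns).map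
          (fun n => (n, (es.foldl updG g) n))) := by
  induction es with
  | nil => intro ns g _ _; rfl
  | cons e es ih =>
    intro ns g hnd h0
    simp only [List.foldl_cons]
    rw [stepA_mapDict hnd h0 e]
    refine ih (nodesStep ns e) (updG g e)
      (addNode_nodup (addNode_nodup hnd _) _) ?_
    intro n hn
    unfold nodesStep at hn
    have h1 : n ∉ ns := fun h => hn (mem_addNode.mpr (Or.inl (mem_addNode.mpr (Or.inl h))))
    have h2 : n ≠ pvE0 e := fun h => hn (mem_addNode.mpr (Or.inl (mem_addNode.mpr (Or.inr h))))
    have h3 : n ≠ pvE1 e := fun h => hn (mem_addNode.mpr (Or.inr h))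
    have h2' : pvE0 e ≠ n := fun h => h2 h.symm
    have h3' : pvE1 e ≠ n := fun h => h3 h.symm
    unfold updG
    simp [h0 n h1, h2', h3']

-- the pointwise neighbour-list fold equals B's inner loop
lemma foldl_updG_apply (es : List (List Int)) :
    ∀ (g : Int → List Int) (n : Int),
    (es.foldl updG g) n
      = es.foldl (fun acc e =>
          let acc := if pvE0 e = n then acc ++ [pvE1 e] else acc
          if pvE1 e = n then acc ++ [pvE0 e] else acc) (g n) := by
  induction es with
  | nil => intro g n; rfl
  | cons e es ih =>
    intro g n
    simp only [List.foldl_cons]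
    rw [ih]
    rfl

lemma altNodes_eq (edges : List (List Int)) :
    altNodes edges = edges.foldl nodesStep [] := rfl

lemma altNodes_nodup (edges : List (List Int)) : (altNodes edges).Nodup := by
  rw [altNodes_eq]
  have h : ∀ (es : List (List Int)) (ns : List Int), ns.Nodup →
      (es.foldl nodesStep ns).Nodup := by
    intro es
    induction es with
    | nil => intro ns h; exact h
    | cons e es ih => intro ns h; exact ih _ (addNode_nodup (addNode_nodup h _) _)
  exact h edges [] List.nodup_nil

-- ===== VERDICT (by name: the statement is the Claim_ definition above) =====
theorem createundirectedgraph_spec : Claim_equal_createundirectedgraph := by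
  intro edges _ _
  show createundirectedgraph edges = createundirectedgraph_alt edges
  unfold createundirectedgraph createundirectedgraph_alt
  have hA : edges.foldl stepA PySem.Dict.empty
      = PySem.Dict.mk ((altNodes edges).map
          (fun n => (n, altNbrs edges n))) := by
    have h0 : PySem.Dict.empty
        = PySem.Dict.mk (([] : List Int).map fun n => (n, (fun _ => ([] : List Int)) n)) := rfl
    rw [h0, foldA_mapDict edges [] (fun _ => []) List.nodup_nil (fun _ _ => rfl)]
    rw [← altNodes_eq]
    congr 1
    apply List.map_congr_left
    intro n _
    rw [foldl_updG_apply]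
    rfl
  have hB : ((altNodes edges).foldl
        (fun g node => g.insert node (altNbrs edges node)) PySem.Dict.empty).items
      = (altNodes edges).map (fun n => (n, altNbrs edges n)) := by
    have := PySem.Dict.items_foldl_insert_fresh (l := altNodes edges)
      (k := fun n => n) (v := fun n => altNbrs edges n) (d := PySem.Dict.empty)
      (by intro a _; exact PySem.Dict.contains_empty a)
      (by simpa using altNodes_nodup edges)
    simpa using this
  rw [hA, hB]
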